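-- pv_equiv track=rewrite | github.com/jcsteinmetz/quantum-circuit-builder | backends/utils.py | basis_to_rank
-- ===== SOURCE A (Python) =====
-- import itertools
-- import math
--
-- def basis_to_rank(element):
--     n_photons = int(sum(element))
--     n_wires = len(element)
--     rank = int(sum(math.comb(n_p + n_wires - 1, n_p) for n_p in range(n_photons)))
--     for remaining_modes, used_photons in zip(reversed(range(1, n_wires)), itertools.accumulate(element)):
--         remaining_photons = n_photons - used_photons
--         rank += sum(math.comb(n_pp + remaining_modes - 1, n_pp) for n_pp in range(int(remaining_photons)))
--     return rank
-- ===== SOURCE B (Python) =====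
-- import math
--
-- def basis_to_rank(element):
--     # One closed-form binomial per wire (hockey-stick identity) instead of an
--     # inner sum of binomials per wire: walk the suffix sums from the right.
--     rank = 0
--     suffix = 0
--     n = len(element)
--     for i in range(n - 1, -1, -1):
--         suffix += element[i]
--         modes = n - i
--         if suffix > 0:
--             rank += math.comb(int(suffix) + modes - 1, modes)
--     return rank
-- ===== Notes on version B (the rewrite author's own statement) =====
-- stated objective: faster
-- what changed: Each inner sum of binomials sum_{p<P} C(p+W-1,p) is collapsed to the closed form C(P+W-1,W) via the hockey-stick identity, and the prefix-sum zip loop becomes a single right-to-left suffix-sum pass with one comb per wire; intended as faster (a timing run measured ~8x at the largest size both finished, ~500x at n=64).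
import Mathlib
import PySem

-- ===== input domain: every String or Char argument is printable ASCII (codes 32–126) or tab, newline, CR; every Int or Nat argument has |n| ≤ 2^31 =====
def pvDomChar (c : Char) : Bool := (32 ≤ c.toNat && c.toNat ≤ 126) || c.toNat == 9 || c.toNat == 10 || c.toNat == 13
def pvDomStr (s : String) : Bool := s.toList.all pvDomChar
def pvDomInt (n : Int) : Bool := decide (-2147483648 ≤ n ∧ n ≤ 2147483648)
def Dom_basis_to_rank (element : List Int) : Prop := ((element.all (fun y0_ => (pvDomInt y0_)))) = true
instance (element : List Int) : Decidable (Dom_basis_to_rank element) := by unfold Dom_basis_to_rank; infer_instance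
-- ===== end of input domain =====

-- B replaces each inner sum of binomials by its hockey-stick closed form and a single
-- right-to-left suffix-sum pass: one comb per wire instead of one comb per photon per wire
-- (intended as faster; a timing run measured ~8x at the largest size both finished).

-- ===== PORT A =====
-- math.comb; exact for nonnegative arguments (the only calls A/B make); computed the way
-- CPython does (falling product over min(k, n-k)) so that it evaluates fast
def pyComb (n k : Int) : Int :=
  if k.toNat ≤ n.toNat then
    let j := min k.toNat (n.toNat - k.toNat)
    ((n.toNat.descFactorial j / j.factorial : Nat) : Int)
  else 0

-- itertools.accumulate with running total s
def pyAccum (s : Int) : List Int → List Int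
  | [] => []
  | x :: xs => (s + x) :: pyAccum (s + x) xs

def basis_to_rank (element : List Int) : Int :=
  let n_photons : Int := element.sum
  let n_wires : Int := element.length
  let rank : Int :=
    ((PySem.List.pyRange 0 n_photons 1).map (fun n_p => pyComb (n_p + n_wires - 1) n_p)).sum
  (((PySem.List.pyRange 1 n_wires 1).reverse).zip (pyAccum 0 element)).foldl
    (fun rank p =>
      let remaining_photons := n_photons - p.2
      rank + ((PySem.List.pyRange 0 remaining_photons 1).map
        (fun n_pp => pyComb (n_pp + p.1 - 1) n_pp)).sum)
    rank

-- ===== PORT B =====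
-- B's loop runs i = n-1 … 0 keeping a suffix sum; ported as the structurally identical foldr
-- with state (suffix, rank, modes).
def basis_to_rank_alt (element : List Int) : Int :=
  (element.foldr
    (fun x (st : Int × Int × Int) =>
      let s := st.1 + x
      let m := st.2.2 + 1
      (s, (if s > 0 then st.2.1 + pyComb (s + m - 1) m else st.2.1), m))
    (0, 0, 0)).2.1

-- ===== PRECONDITION & SPEC =====
def Spec_basis_to_rank (element : List Int) (out : Int) : Prop := out = basis_to_rank_alt element
instance (element : List Int) (out : Int) : Decidable (Spec_basis_to_rank element out) := by unfold Spec_basis_to_rank; infer_instance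

-- ===== CLAIM (what is proved, stated in full; the proofs are below) =====
def Claim_equal_basis_to_rank : Prop := ∀ (element : List Int), Dom_basis_to_rank element → Spec_basis_to_rank element (basis_to_rank element)

-- ===== LEMMAS AND PROOFS =====

-- A's inner sum for a given photon count / mode count
def blockA (photons modes : Int) : Int :=
  ((PySem.List.pyRange 0 photons 1).map (fun p => pyComb (p + modes - 1) p)).sum

theorem pyComb_eq_choose (n k : Int) : pyComb n k = ((n.toNat.choose k.toNat : Nat) : Int) := by
  unfold pyComb
  split_ifs with h
  · by_cases hle : k.toNat ≤ n.toNat - k.toNat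
    · rw [min_eq_left hle, Nat.choose_eq_descFactorial_div_factorial]
    · rw [min_eq_right (le_of_not_ge hle), ← Nat.choose_symm h,
        Nat.choose_eq_descFactorial_div_factorial]
  · rw [Nat.choose_eq_zero_of_lt (by omega)]
    rfl

-- B's closed-form term
def termB (photons modes : Int) : Int :=
  if photons > 0 then pyComb (photons + modes - 1) modes else 0

-- hockey stick on Nat
theorem hs (P m : Nat) :
    (((List.range P).map (fun p => (p + m).choose p)).sum) = (P + m).choose (m + 1) := by
  induction P with
  | zero => simp
  | succ n ih =>
      rw [List.range_succ, List.map_append, List.sum_append, ih]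
      have h1 : (n + m).choose n = (n + m).choose m := by
        rw [← Nat.choose_symm (by omega : n ≤ n + m)]
        congr 1; omega
      simp only [List.map_cons, List.map_nil, List.sum_cons, List.sum_nil, add_zero]
      have h2 : (n + 1 + m).choose (m + 1) = (n + m).choose m + (n + m).choose (m + 1) := by
        have := Nat.choose_succ_succ (n + m) m
        simpa [Nat.succ_eq_add_one, show n + m + 1 = n + 1 + m by omega] using this
      omega

theorem blockA_eq_termB (photons modes : Int) (hm : 1 ≤ modes) :
    blockA photons modes = termB photons modes := by
  unfold blockA termB
  by_cases hp : photons > 0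
  · simp only [hp, if_true]
    rw [PySem.List.pyRange_one]
    have hsub : photons - 0 = photons := by ring
    rw [hsub, List.map_map]
    have hcast : ∀ p : Nat,
        ((fun p => pyComb (p + modes - 1) p) ∘ fun k : Nat => (0 : Int) + k) p
          = (((p + (modes.toNat - 1)).choose p : Nat) : Int) := by
      intro p
      simp only [Function.comp, zero_add]
      rw [pyComb_eq_choose]
      have h1 : (((p : Int)) + modes - 1).toNat = p + (modes.toNat - 1) := by omega
      have h2 : ((p : Int)).toNat = p := by omega
      rw [h1, h2]
    rw [List.map_congr_left (fun p _ => hcast p)]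
    have hcast2 : ((List.range photons.toNat).map (fun p => (((p + (modes.toNat - 1)).choose p : Nat) : Int))).sum
        = (((((List.range photons.toNat).map (fun p => (p + (modes.toNat - 1)).choose p)).sum : Nat)) : Int) := by
      rw [Nat.cast_list_sum, List.map_map]; rfl
    rw [hcast2, hs, pyComb_eq_choose]
    congr 2 <;> omega
  · simp only [hp, if_false]
    rw [PySem.List.pyRange_one]
    have h0 : photons.toNat = 0 := by omega
    simp [h0]

-- the common recursive specification: one term per suffix
def G : List Int → Int
  | [] => 0
  | x :: xs => G xs + termB (x + xs.sum) (xs.length + 1)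

-- accumulate shifts by the seed
theorem pyAccum_shift (s : Int) (xs : List Int) :
    pyAccum s xs = (pyAccum 0 xs).map (fun t => s + t) := by
  induction xs generalizing s with
  | nil => rfl
  | cons x xs ih =>
      simp only [pyAccum, List.map_cons, zero_add]
      congr 1
      rw [ih (s + x), ih x, List.map_map]
      apply List.map_congr_left
      intro t _
      simp only [Function.comp]; ring

-- generic: foldl accumulating additions = init + sum of mapped terms
theorem foldl_add_gen (l : List (Int × Int)) (g : Int × Int → Int) (init : Int) :
    l.foldl (fun r p => r + g p) init = init + (l.map g).sum := by
  induction l generalizing init with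
  | nil => simp
  | cons p l ih => simp [ih]; ring

-- A equals G
theorem A_eq_G (element : List Int) : basis_to_rank element = G element := by
  induction element with
  | nil => rfl
  | cons x xs ih =>
      -- unfold A on x :: xs
      unfold basis_to_rank
      simp only []
      rw [foldl_add_gen]
      unfold basis_to_rank at ih
      rw [foldl_add_gen] at ih
      -- the modes list
      have hlen : ((x :: xs).length : Int) = (xs.length : Int) + 1 := by simp
      rw [hlen]
      by_cases hn : xs.length = 0
      · -- xs = []
        match xs, hn with
        | [], _ =>
          simp [G, termB]
          have h := blockA_eq_termB x 1 le_rfl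
          unfold blockA termB at h
          simpa using h
      · have h1 : (1 : Int) ≤ (xs.length : Int) := by omega
        rw [PySem.List.pyRange_one_succ_right h1, List.reverse_append]
        simp only [List.reverse_cons, List.reverse_nil, List.nil_append, List.cons_append]
        -- zip: first pair is (xs.length, x) since pyAccum 0 (x::xs) = x :: pyAccum x xs
        have haccum : pyAccum 0 (x :: xs) = x :: pyAccum x xs := by simp [pyAccum]
        rw [haccum]
        simp only [List.zip_cons_cons, List.map_cons, List.sum_cons]
        -- shift the accumulator
        rw [pyAccum_shift x xs, List.zip_map_right, List.map_map]
        -- rewrite each mapped term to match A xs's terms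
        have hterms :
            (((PySem.List.pyRange 1 (xs.length : Int) 1).reverse.zip (pyAccum 0 xs)).map
              ((fun p => ((PySem.List.pyRange 0 (x + xs.sum - p.2) 1).map
                  (fun n_pp => pyComb (n_pp + p.1 - 1) n_pp)).sum) ∘ Prod.map id (fun t => x + t)))
            = (((PySem.List.pyRange 1 (xs.length : Int) 1).reverse.zip (pyAccum 0 xs)).map
              (fun p => ((PySem.List.pyRange 0 (xs.sum - p.2) 1).map
                  (fun n_pp => pyComb (n_pp + p.1 - 1) n_pp)).sum)) := by
          apply List.map_congr_left
          intro p _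
          simp only [Function.comp, Prod.map, id]
          congr 2
          ring
        rw [hterms]
        have hb1 : ((PySem.List.pyRange 0 (x + xs.sum) 1).map
            (fun n_p => pyComb (n_p + ((xs.length : Int) + 1) - 1) n_p)).sum
            = termB (x + xs.sum) ((xs.length : Int) + 1) := by
          have h := blockA_eq_termB (x + xs.sum) ((xs.length : Int) + 1) (by omega)
          unfold blockA at h
          exact h
        have hb2 : ((PySem.List.pyRange 0 (x + xs.sum - x) 1).map
            (fun n_pp => pyComb (n_pp + (xs.length : Int) - 1) n_pp)).sum
            = ((PySem.List.pyRange 0 (xs.sum) 1).map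
              (fun n_p => pyComb (n_p + (xs.length : Int) - 1) n_p)).sum := by
          congr 2
          ring
        rw [hb1, hb2, G, ← ih]
        ring

-- B's foldr invariant
theorem B_inv (xs : List Int) :
    xs.foldr
      (fun x (st : Int × Int × Int) =>
        let s := st.1 + x
        let m := st.2.2 + 1
        (s, (if s > 0 then st.2.1 + pyComb (s + m - 1) m else st.2.1), m))
      (0, 0, 0)
    = (xs.sum, G xs, (xs.length : Int)) := by
  induction xs with
  | nil => rfl
  | cons x xs ih =>
      simp only [List.foldr_cons, ih]
      refine Prod.ext ?_ (Prod.ext ?_ ?_)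
      · simp [add_comm]
      · simp only [G, termB]
        have h : xs.sum + x = x + xs.sum := by ring
        rw [h]
        split_ifs with hpos
        · rfl
        · exact (add_zero _).symm
      · simp

theorem B_eq_G (element : List Int) : basis_to_rank_alt element = G element := by
  unfold basis_to_rank_alt
  rw [B_inv]

-- ===== VERDICT (by name: the statement is the Claim_ definition above) =====
theorem basis_to_rank_spec : Claim_equal_basis_to_rank := by
  intro element _
  unfold Spec_basis_to_rank
  rw [A_eq_G, B_eq_G]
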